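-- pv_equiv track=rewrite | github.com/MorganS42/Poker | 6plus.py | straight_high_shortdeck
-- ===== SOURCE A (Python) =====
-- def straight_high_shortdeck(ranks):
--     r = sorted(set(ranks))
--     if len(r) < 5:
--         return 0
--
--     for i in range(len(r) - 4):
--         w = r[i:i+5]
--         if w == list(range(w[0], w[0] + 5)):
--             return w[-1]
--
--     # A 6 7 8 9 Straight
--     wheel_set = {14, 6, 7, 8, 9}
--     if wheel_set.issubset(r):
--         return 9
--
--     return 0
-- ===== SOURCE B (Python) =====
-- def straight_high_shortdeck(ranks):
--     r = sorted(set(ranks))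
--     run = 1
--     for prev, cur in zip(r, r[1:]):
--         run = run + 1 if cur == prev + 1 else 1
--         if run == 5:
--             return cur
--     if {14, 6, 7, 8, 9}.issubset(r):
--         return 9
--     return 0
-- ===== Notes on version B (the rewrite author's own statement) =====
-- stated objective: simpler
-- what changed: Replaces A's per-window slice r[i:i+5] == list(range(...)) scan over indices by a single forward pass over zip(r, r[1:]) that maintains a run-length counter of consecutive ranks and returns as soon as the run reaches 5; the small-input early return disappears (a run of 5 and the wheel both need 5 distinct ranks).
import Mathlib
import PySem

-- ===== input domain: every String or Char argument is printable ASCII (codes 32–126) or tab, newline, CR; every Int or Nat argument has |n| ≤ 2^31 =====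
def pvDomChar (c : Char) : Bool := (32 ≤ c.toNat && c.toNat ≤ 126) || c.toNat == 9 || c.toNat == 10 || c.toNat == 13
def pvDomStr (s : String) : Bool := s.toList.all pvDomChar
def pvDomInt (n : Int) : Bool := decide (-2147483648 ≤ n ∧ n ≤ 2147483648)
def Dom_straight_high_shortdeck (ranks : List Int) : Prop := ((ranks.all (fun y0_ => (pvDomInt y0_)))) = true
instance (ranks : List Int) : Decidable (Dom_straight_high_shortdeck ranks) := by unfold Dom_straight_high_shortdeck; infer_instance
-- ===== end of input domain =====

-- B replaces A's per-window slice-vs-range test by a single streak counter over adjacent pairs (simpler: one pass, no per-window list building).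


-- ===== PORT A =====
-- A's loop 'for i in range(len(r) - 4): w = r[i:i+5]; if w == list(range(w[0], w[0]+5)): return w[-1]'
-- as recursion over the index list; w[0] / w[-1] ported as headD 0 / getLastD 0 — exact here, since for
-- every index produced by the range the slice w has exactly 5 elements.
def aWindows (r : List Int) : List Int → Option Int
  | [] => none
  | i :: is =>
      let w := PySem.List.slice r (some i) (some (i + 5))
      if w = PySem.List.pyRange (w.headD 0) (w.headD 0 + 5) 1 then some (w.getLastD 0)
      else aWindows r is

def straight_high_shortdeck (ranks : List Int) : Int :=
  let r := PySem.List.sorted (PySem.Set.ofList ranks) (fun x => x) false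
  if r.length < 5 then 0
  else
    match aWindows r (PySem.List.pyRange 0 ((r.length : Int) - 4) 1) with
    | some v => v
    | none =>
        -- wheel_set = {14, 6, 7, 8, 9}; wheel_set.issubset(r)
        if PySem.Set.issubset (PySem.Set.ofList [14, 6, 7, 8, 9]) r then 9 else 0

-- ===== PORT B =====
-- B's loop 'for prev, cur in zip(r, r[1:])' with the run counter, as recursion over the pair list.
def bPairs : List (Int × Int) → Int → Option Int
  | [], _ => none
  | (prev, cur) :: rest, run =>
      let run' := if cur = prev + 1 then run + 1 else 1
      if run' = 5 then some cur else bPairs rest run'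

def straight_high_shortdeck_alt (ranks : List Int) : Int :=
  let r := PySem.List.sorted (PySem.Set.ofList ranks) (fun x => x) false
  match bPairs (r.zip (PySem.List.slice r (some 1) none)) 1 with
  | some v => v
  | none => if PySem.Set.issubset (PySem.Set.ofList [14, 6, 7, 8, 9]) r then 9 else 0

-- ===== PRECONDITION & SPEC =====
def Spec_straight_high_shortdeck (ranks : List Int) (out : Int) : Prop := out = straight_high_shortdeck_alt ranks
instance (ranks : List Int) (out : Int) : Decidable (Spec_straight_high_shortdeck ranks out) := by unfold Spec_straight_high_shortdeck; infer_instance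

-- ===== CLAIM (what is proved, stated in full; the proofs are below) =====
def Claim_equal_straight_high_shortdeck : Prop := ∀ (ranks : List Int), Dom_straight_high_shortdeck ranks → Spec_straight_high_shortdeck ranks (straight_high_shortdeck ranks)

-- ===== LEMMAS AND PROOFS =====

-- reference form of A's scan: recursion over suffixes, testing the first window of five
def win5? : List Int → Option Int
  | a :: b :: c :: d :: e :: _ =>
      if b = a + 1 ∧ c = b + 1 ∧ d = c + 1 ∧ e = d + 1 then some e else none
  | _ => none

def aRec : List Int → Option Int
  | [] => none
  | a :: rest =>
      match win5? (a :: rest) with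
      | some v => some v
      | none => aRec rest

-- reference form of B's scan: run counter threaded down the list
def bRec : Int → Int → List Int → Option Int
  | _, _, [] => none
  | prev, run, cur :: rest =>
      let run' := if cur = prev + 1 then run + 1 else 1
      if run' = 5 then some cur else bRec cur run' rest

-- the consecutive chain [prev - n + 1, …, prev] of length n
def chainOf : Nat → Int → List Int
  | 0, _ => []
  | n + 1, prev => (prev - n) :: chainOf n prev

theorem length_chainOf (n : Nat) (prev : Int) : (chainOf n prev).length = n := by
  induction n generalizing prev with
  | zero => rfl
  | succ m ih => simp [chainOf, ih]

theorem chainOf_snoc (n : Nat) (prev : Int) :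
    chainOf (n + 1) prev = chainOf n (prev - 1) ++ [prev] := by
  induction n generalizing prev with
  | zero => simp [chainOf]
  | succ m ih =>
    show (prev - (m + 1 : Nat)) :: chainOf (m + 1) prev = chainOf (m + 1) (prev - 1) ++ [prev]
    rw [ih prev]
    show (prev - (m + 1 : Nat)) :: (chainOf m (prev - 1) ++ [prev])
        = ((prev - 1 - m) :: chainOf m (prev - 1)) ++ [prev]
    push_cast
    congr 1
    ring


theorem win5?_cons (a b c d e : Int) (t : List Int) :
    win5? (a :: b :: c :: d :: e :: t)
      = if b = a + 1 ∧ c = b + 1 ∧ d = c + 1 ∧ e = d + 1 then some e else none := rfl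

theorem aRec_cons (a : Int) (rest : List Int) :
    aRec (a :: rest)
      = match win5? (a :: rest) with | some v => some v | none => aRec rest := rfl

theorem bRec_cons (prev run cur : Int) (rest : List Int) :
    bRec prev run (cur :: rest)
      = if (if cur = prev + 1 then run + 1 else 1) = 5 then some cur
        else bRec cur (if cur = prev + 1 then run + 1 else 1) rest := rfl

theorem bPairs_cons (prev cur run : Int) (rest : List (Int × Int)) :
    bPairs ((prev, cur) :: rest) run
      = if (if cur = prev + 1 then run + 1 else 1) = 5 then some cur
        else bPairs rest (if cur = prev + 1 then run + 1 else 1) := rfl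

theorem aRec_short (l : List Int) (h : l.length < 5) : aRec l = none := by
  match l, h with
  | [], _ => rfl
  | [a], _ => rfl
  | [a, b], _ => rfl
  | [a, b, c], _ => rfl
  | [a, b, c, d], _ => rfl

-- every window of aRec that starts inside a short chain broken at (prev, cur) fails
theorem aRec_break (n : Nat) (hn : n ≤ 4) (prev cur : Int) (rest : List Int)
    (hc : cur ≠ prev + 1) :
    aRec (chainOf n prev ++ cur :: rest) = aRec (cur :: rest) := by
  have h1 : ¬ (cur = prev + 1) := hc
  interval_cases n <;>
    rcases rest with _ | ⟨x1, _ | ⟨x2, _ | ⟨x3, rr⟩⟩⟩ <;>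
    simp [chainOf, aRec, win5?, h1]

theorem bRec_short (xs : List Int) (prev run : Int) (h1 : 1 ≤ run)
    (h2 : run + xs.length < 5) : bRec prev run xs = none := by
  induction xs generalizing prev run with
  | nil => rfl
  | cons cur rest ih =>
    rw [bRec_cons]
    simp only [List.length_cons] at h2
    by_cases hc : cur = prev + 1
    · rw [if_pos hc, if_neg (by push_cast at h2 ⊢; omega)]
      exact ih cur (run + 1) (by omega) (by push_cast at h2 ⊢; omega)
    · rw [if_neg hc, if_neg (by omega)]
      exact ih cur 1 le_rfl (by push_cast at h2 ⊢; omega)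

-- the main invariant: a run counter of n+1 equals a window scan with the chain prepended
theorem bRec_eq_aRec (rest : List Int) (prev : Int) (n : Nat) (hn : n ≤ 3) :
    bRec prev ((n : Int) + 1) rest = aRec (chainOf (n + 1) prev ++ rest) := by
  induction rest generalizing prev n with
  | nil =>
    rw [List.append_nil, aRec_short _ (by rw [length_chainOf]; omega)]
    rfl
  | cons cur rest' ih =>
    rw [bRec_cons]
    by_cases hc : cur = prev + 1
    · rw [if_pos hc]
      by_cases h3 : n = 3
      · subst h3
        rw [if_pos (by norm_num)]
        have hfin : aRec (chainOf 4 prev ++ cur :: rest') = some cur := by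
          show aRec ((prev - 3) :: (prev - 2) :: (prev - 1) :: (prev - 0) :: cur :: rest')
              = some cur
          rw [aRec_cons, win5?_cons, if_pos (by omega)]
        exact hfin.symm
      · rw [if_neg (by omega)]
        have ih' := ih cur (n + 1) (by omega)
        rw [show ((n : Int) + 1) + 1 = ((n + 1 : Nat) : Int) + 1 by push_cast; ring]
        rw [ih', chainOf_snoc (n + 1) cur]
        rw [show cur - 1 = prev by omega]
        rw [List.append_assoc]
        rfl
    · rw [if_neg hc, if_neg (by norm_num)]
      have ih' := ih cur 0 (by omega)
      simp only [Nat.cast_zero, zero_add] at ih'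
      rw [ih']
      show aRec ((cur - 0) :: rest') = aRec (chainOf (n + 1) prev ++ cur :: rest')
      rw [show cur - 0 = cur by ring, aRec_break (n + 1) (by omega) prev cur rest' hc]

-- bridge: B's fold over zip(r, r[1:]) is bRec
theorem bPairs_zip (xs : List Int) (x run : Int) :
    bPairs ((x :: xs).zip xs) run = bRec x run xs := by
  induction xs generalizing x run with
  | nil => rfl
  | cons cur rest ih =>
    show bPairs ((x, cur) :: (cur :: rest).zip rest) run = _
    rw [bPairs_cons, bRec_cons, ih]

theorem cons_eq_range5 (a b c d e : Int)
    (hC : b = a + 1 ∧ c = b + 1 ∧ d = c + 1 ∧ e = d + 1) :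
    ([a, b, c, d, e] : List Int) = [a, a + 1, a + 2, a + 3, a + 4] := by
  obtain ⟨h1, h2, h3, h4⟩ := hC
  subst h1; subst h2; subst h3; subst h4
  norm_num
  omega

theorem exists_five (l : List Int) (h : 5 ≤ l.length) :
    ∃ a b c d e t, l = a :: b :: c :: d :: e :: t :=
  match l, h with
  | a :: b :: c :: d :: e :: t, _ => ⟨a, b, c, d, e, t, rfl⟩
  | [], h => by simp at h
  | [a], h => by simp at h
  | [a, b], h => by simp at h
  | [a, b, c], h => by simp at h
  | [a, b, c, d], h => by simp at h

-- bridge: A's indexed loop over range(len(r)-4) is aRec on the suffix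
theorem aWindows_eq_aRec (r : List Int) (hlen : 5 ≤ r.length) :
    ∀ (k i : Nat), i + k = r.length - 4 →
      aWindows r (PySem.List.pyRange (i : Int) ((r.length : Int) - 4) 1) = aRec (r.drop i) := by
  intro k
  induction k with
  | zero =>
    intro i hi
    rw [PySem.List.pyRange_one_eq_nil (by omega)]
    rw [aRec_short _ (by simp [List.length_drop]; omega)]
    rfl
  | succ m ih =>
    intro i hi
    rw [PySem.List.pyRange_one_cons (by omega)]
    have hdl : 5 ≤ (r.drop i).length := by simp [List.length_drop]; omega
    obtain ⟨a, b, c, d, e, t, hd⟩ := exists_five _ hdl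
    have hw : PySem.List.slice r (some (i : Int)) (some ((i : Int) + 5)) = [a, b, c, d, e] := by
      rw [show ((5 : Int)) = ((5 : Nat) : Int) by norm_num, PySem.List.slice_natCast_add, hd]
      rfl
    have hpr : PySem.List.pyRange a (a + 5) 1 = [a, a+1, a+2, a+3, a+4] := by
      rw [PySem.List.pyRange_one_cons (by omega), PySem.List.pyRange_one_cons (by omega),
          PySem.List.pyRange_one_cons (by omega), PySem.List.pyRange_one_cons (by omega),
          PySem.List.pyRange_one_cons (by omega), PySem.List.pyRange_one_eq_nil (by omega)]
      norm_num
      omega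
    show (let w := PySem.List.slice r (some (i : Int)) (some ((i : Int) + 5));
          if w = PySem.List.pyRange (w.headD 0) (w.headD 0 + 5) 1 then some (w.getLastD 0)
          else aWindows r (PySem.List.pyRange ((i : Int) + 1) ((r.length : Int) - 4) 1)) = aRec (r.drop i)
    simp only [hw, List.headD_cons, hpr, List.getLastD_cons]
    have haR : aRec (r.drop i)
        = match win5? (a :: b :: c :: d :: e :: t) with
          | some v => some v
          | none => aRec (b :: c :: d :: e :: t) := by rw [hd, aRec_cons]
    by_cases hC : b = a + 1 ∧ c = b + 1 ∧ d = c + 1 ∧ e = d + 1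
    · rw [if_pos (cons_eq_range5 a b c d e hC), haR, win5?_cons, if_pos hC]
      rfl
    · rw [if_neg (by intro h; apply hC; simp at h; omega)]
      rw [haR, win5?_cons, if_neg hC]
      have := ih (i + 1) (by omega)
      rw [show ((i : Int) + 1) = ((i + 1 : Nat) : Int) by push_cast; ring, this]
      rw [← List.tail_drop, hd]
      rfl

-- wheel needs five distinct ranks: on a nodup list shorter than 5 the subset test is false
theorem wheel_false_of_short (r : List Int) (hnd : r.Nodup) (hlen : r.length < 5) :
    PySem.Set.issubset (PySem.Set.ofList [14, 6, 7, 8, 9]) r = false := by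
  by_contra h
  have hb : PySem.Set.issubset (PySem.Set.ofList [14, 6, 7, 8, 9]) r = true := by
    cases hx : PySem.Set.issubset (PySem.Set.ofList [14, 6, 7, 8, 9]) r
    · exact absurd hx h
    · rfl
  have hmem : ∀ x ∈ ([14, 6, 7, 8, 9] : List Int), x ∈ r := by
    intro x hx
    have : PySem.Set.ofList ([14, 6, 7, 8, 9] : List Int) = [14, 6, 7, 8, 9] := by decide
    unfold PySem.Set.issubset at hb
    rw [this] at hb
    rw [List.all_eq_true] at hb
    exact (PySem.Set.contains_iff r x).mp (hb x hx)
  have hsub : ({14, 6, 7, 8, 9} : Finset Int) ⊆ r.toFinset := by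
    intro x hx
    rw [List.mem_toFinset]
    apply hmem
    fin_cases hx <;> simp
  have h5 : ({14, 6, 7, 8, 9} : Finset Int).card = 5 := by decide
  have := Finset.card_le_card hsub
  rw [h5, List.toFinset_card_of_nodup hnd] at this
  omega

theorem sorted_set_nodup (ranks : List Int) :
    (PySem.List.sorted (PySem.Set.ofList ranks) (fun x => x) false).Nodup :=
  (PySem.List.sorted_ofList_pairwise_lt ranks).imp (fun h => ne_of_lt h)

-- ===== VERDICT (by name: the statement is the Claim_ definition above) =====
theorem straight_high_shortdeck_spec : Claim_equal_straight_high_shortdeck := by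
  intro ranks _
  unfold Spec_straight_high_shortdeck straight_high_shortdeck straight_high_shortdeck_alt
  simp only [PySem.List.slice_from_one]
  set r := PySem.List.sorted (PySem.Set.ofList ranks) (fun x => x) false with hr
  have hnd : r.Nodup := sorted_set_nodup ranks
  by_cases hlen : r.length < 5
  · rw [if_pos hlen]
    have hloop : bPairs (r.zip r.tail) 1 = none := by
      rcases r with _ | ⟨x, xs⟩
      · rfl
      · rw [List.tail_cons, bPairs_zip]
        exact bRec_short xs x 1 le_rfl (by simp at hlen ⊢; omega)
    rw [hloop, wheel_false_of_short r hnd hlen]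
    rfl
  · rw [if_neg hlen]
    have hlen' : 5 ≤ r.length := by omega
    have hA := aWindows_eq_aRec r hlen' (r.length - 4) 0 (by omega)
    rw [show ((0 : Nat) : Int) = 0 by norm_num, List.drop_zero] at hA
    have hB : bPairs (r.zip r.tail) 1 = aRec r := by
      rcases r with _ | ⟨x, xs⟩
      · simp at hlen'
      · rw [List.tail_cons, bPairs_zip]
        have := bRec_eq_aRec xs x 0 (by omega)
        simp only [Nat.cast_zero, zero_add] at this
        rw [this]
        show aRec ((x - 0) :: xs) = aRec (x :: xs)
        rw [show x - 0 = x by ring]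
    rw [hA, hB]
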